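-- pv_equiv track=rewrite | github.com/nekkk/mil-manager | tools/generate-lang-json.py | normalize_language_key_part
-- ===== SOURCE A (Python) =====
-- def normalize_language_key_part(text: str) -> str:
--     normalized: list[str] = []
--     last_underscore = False
--     for ch in text:
--         if ch.isascii() and (ch.islower() or ch.isdigit()):
--             normalized.append(ch)
--             last_underscore = False
--             continue
--         if ch.isascii() and ch.isupper():
--             normalized.append(ch.lower())
--             last_underscore = False
--             continue
--         if not last_underscore:
--             normalized.append("_")
--             last_underscore = True
--     result = "".join(normalized).strip("_")
--     return result or "text"
-- ===== SOURCE B (Python) =====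
-- import re
--
-- def normalize_language_key_part(text: str) -> str:
--     result = re.sub(r'[^a-zA-Z0-9]+', '_', text).lower().strip('_')
--     return result or "text"
-- ===== Notes on version B (the rewrite author's own statement) =====
-- stated objective: idiomatic
-- what changed: Replaces the stateful per-character loop with a last_underscore flag by a single regex substitution that collapses each maximal run of non-ASCII-alphanumeric characters into one underscore, then lowercases and strips edge underscores.
import Mathlib
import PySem

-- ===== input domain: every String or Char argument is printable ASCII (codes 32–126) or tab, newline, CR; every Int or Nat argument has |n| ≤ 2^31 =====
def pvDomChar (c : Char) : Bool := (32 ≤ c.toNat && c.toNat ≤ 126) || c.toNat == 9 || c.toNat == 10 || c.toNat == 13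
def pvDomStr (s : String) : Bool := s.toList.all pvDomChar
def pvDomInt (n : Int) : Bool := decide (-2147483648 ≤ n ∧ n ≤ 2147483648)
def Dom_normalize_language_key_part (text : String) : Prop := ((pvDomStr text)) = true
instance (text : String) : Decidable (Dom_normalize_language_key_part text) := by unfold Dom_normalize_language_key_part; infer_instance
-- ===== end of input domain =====

-- B replaces A's stateful per-character loop by one regex-style run-collapse plus lower/strip (idiomatic).


-- ===== PORT A =====
-- ch.isascii() ported by hand as c.toNat ≤ 127 (exact: Python's isascii is codepoint < 128)
def normalize_language_key_part (text : String) : String :=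
  let st := text.toList.foldl (fun (st : List Char × Bool) ch =>
    if (ch.toNat ≤ 127) && (PySem.Chars.islower ch || PySem.Chars.isdigit ch) then
      (st.1 ++ [ch], false)
    else if (ch.toNat ≤ 127) && PySem.Chars.isupper ch then
      (st.1 ++ [PySem.Chars.lowerChar ch], false)
    else if !st.2 then (st.1 ++ ['_'], true)
    else st) ([], false)
  let result := PySem.Str.stripChars (String.ofList st.1) "_"
  if result = "" then "text" else result

-- ===== PORT B =====
-- regex character class [a-zA-Z0-9]
def pvReKeep (c : Char) : Bool := ('a' ≤ c && c ≤ 'z') || ('A' ≤ c && c ≤ 'Z') || ('0' ≤ c && c ≤ '9')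

-- re.sub(r'[^a-zA-Z0-9]+', '_', ·): each maximal run of non-matching chars becomes one '_'
def pvCollapse : List Char → List Char
  | [] => []
  | c :: rest =>
    if pvReKeep c then c :: pvCollapse rest
    else '_' :: pvCollapse (rest.dropWhile (fun d => !pvReKeep d))
termination_by l => l.length
decreasing_by
  · simp
  · have := List.length_dropWhile_le (fun d => !pvReKeep d) rest
    simp; omega

def normalize_language_key_part_alt (text : String) : String :=
  let result := PySem.Str.stripChars (PySem.Str.lower (String.ofList (pvCollapse text.toList))) "_"
  if result = "" then "text" else result

-- ===== PRECONDITION & SPEC =====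
def Spec_normalize_language_key_part (text : String) (out : String) : Prop := out = normalize_language_key_part_alt text
instance (text : String) (out : String) : Decidable (Spec_normalize_language_key_part text out) := by unfold Spec_normalize_language_key_part; infer_instance

-- ===== CLAIM (what is proved, stated in full; the proofs are below) =====
def Claim_equal_normalize_language_key_part : Prop := ∀ (text : String), Dom_normalize_language_key_part text → Spec_normalize_language_key_part text (normalize_language_key_part text)

-- ===== LEMMAS AND PROOFS =====

theorem pvCharLeIff (a b : Char) : (a ≤ b) ↔ a.toNat ≤ b.toNat := ge_iff_le

-- proof-side recursive form of A's loop
def pvRunA : List Char → Bool → List Char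
  | [], _ => []
  | c :: rest, flag =>
    if (c.toNat ≤ 127) && (PySem.Chars.islower c || PySem.Chars.isdigit c) then
      c :: pvRunA rest false
    else if (c.toNat ≤ 127) && PySem.Chars.isupper c then
      PySem.Chars.lowerChar c :: pvRunA rest false
    else if !flag then '_' :: pvRunA rest true
    else pvRunA rest true

theorem pvFoldA (l : List Char) (acc : List Char) (flag : Bool) :
    (l.foldl (fun (st : List Char × Bool) ch =>
      if (ch.toNat ≤ 127) && (PySem.Chars.islower ch || PySem.Chars.isdigit ch) then
        (st.1 ++ [ch], false)
      else if (ch.toNat ≤ 127) && PySem.Chars.isupper ch then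
        (st.1 ++ [PySem.Chars.lowerChar ch], false)
      else if !st.2 then (st.1 ++ ['_'], true)
      else st) (acc, flag)).1 = acc ++ pvRunA l flag := by
  induction l generalizing acc flag with
  | nil => simp [pvRunA]
  | cons c rest ih =>
    rw [List.foldl_cons, pvRunA]
    by_cases h1 : ((c.toNat ≤ 127) && (PySem.Chars.islower c || PySem.Chars.isdigit c)) = true
    · rw [if_pos h1, if_pos h1, ih]; simp
    · by_cases h2 : ((c.toNat ≤ 127) && PySem.Chars.isupper c) = true
      · rw [if_neg h1, if_neg h1, if_pos h2, if_pos h2, ih]; simp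
      · cases flag
        · rw [if_neg h1, if_neg h1, if_neg h2, if_neg h2]; simp only [Bool.not_false, if_pos]
          rw [ih]; simp
        · rw [if_neg h1, if_neg h1, if_neg h2, if_neg h2]; simp only [Bool.not_true]
          rw [if_neg (by simp), ih]; simp

theorem pvMain (l : List Char) (hA : ∀ c ∈ l, pvDomChar c = true) :
    pvRunA l false = (pvCollapse l).map PySem.Chars.lowerChar ∧
    pvRunA l true = (pvCollapse (l.dropWhile (fun d => !pvReKeep d))).map PySem.Chars.lowerChar := by
  induction l with
  | nil => simp [pvRunA, pvCollapse]
  | cons c rest ih =>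
    have hc : pvDomChar c = true := hA c (by simp)
    have ih' := ih (fun d hd => hA d (by simp [hd]))
    have hascii : c.toNat ≤ 127 := by
      simp [pvDomChar] at hc; omega
    by_cases hk : pvReKeep c = true
    · have hcase : ((PySem.Chars.islower c || PySem.Chars.isdigit c) = true) ∨
          ((PySem.Chars.islower c || PySem.Chars.isdigit c) = false ∧ PySem.Chars.isupper c = true) := by
        simp only [pvReKeep, PySem.Chars.islower, PySem.Chars.isupper, PySem.Chars.isdigit,
          pvCharLeIff, Bool.or_eq_true, Bool.or_eq_false_iff, Bool.and_eq_true, Bool.and_eq_false_iff,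
          decide_eq_true_eq, decide_eq_false_iff_not, not_le] at hk ⊢
        omega
      have hcol : pvCollapse (c :: rest) = c :: pvCollapse rest := by rw [pvCollapse]; simp [hk]
      have hgoal : pvRunA (c :: rest) false = (pvCollapse (c :: rest)).map PySem.Chars.lowerChar := by
        rw [pvRunA, hcol]
        rcases hcase with h | ⟨hno, h⟩
        · have hlow : PySem.Chars.lowerChar c = c := by
            simp only [PySem.Chars.islower, PySem.Chars.isdigit, pvCharLeIff, Bool.or_eq_true,
              Bool.and_eq_true, decide_eq_true_eq] at h
            simp only [PySem.Chars.lowerChar, PySem.Chars.isupper, pvCharLeIff, Bool.and_eq_true,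
              decide_eq_true_eq, ite_eq_right_iff, and_imp]
            intro h1 h2
            exfalso
            have c1 : 'A'.toNat = 65 := by decide
            have c2 : 'Z'.toNat = 90 := by decide
            have c3 : 'a'.toNat = 97 := by decide
            have c4 : 'z'.toNat = 122 := by decide
            have c5 : '0'.toNat = 48 := by decide
            have c6 : '9'.toNat = 57 := by decide
            omega
          simp [hascii, h, ih'.1, hlow]
        · simp [hascii, hno, h, ih'.1]
      refine ⟨hgoal, ?_⟩
      have hdw : (c :: rest).dropWhile (fun d => !pvReKeep d) = c :: rest := by
        simp [hk]
      rw [hdw, ← hgoal, pvRunA, pvRunA]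
      rcases hcase with h | ⟨hno, h⟩
      · simp [hascii, h]
      · simp [hascii, hno, h]
    · have hk' : pvReKeep c = false := by simpa using hk
      have hnums : ¬ (97 ≤ c.toNat ∧ c.toNat ≤ 122) ∧ ¬ (65 ≤ c.toNat ∧ c.toNat ≤ 90) ∧
          ¬ (48 ≤ c.toNat ∧ c.toNat ≤ 57) := by
        simp only [pvReKeep, pvCharLeIff, Bool.or_eq_false_iff, Bool.and_eq_false_iff,
          decide_eq_false_iff_not, not_le] at hk'
        have c1 : 'A'.toNat = 65 := by decide
        have c2 : 'Z'.toNat = 90 := by decide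
        have c3 : 'a'.toNat = 97 := by decide
        have c4 : 'z'.toNat = 122 := by decide
        have c5 : '0'.toNat = 48 := by decide
        have c6 : '9'.toNat = 57 := by decide
        omega
      have hnl : (PySem.Chars.islower c || PySem.Chars.isdigit c) = false := by
        simp only [PySem.Chars.islower, PySem.Chars.isdigit, pvCharLeIff, Bool.or_eq_false_iff,
          Bool.and_eq_false_iff, decide_eq_false_iff_not, not_le]
        have c3 : 'a'.toNat = 97 := by decide
        have c4 : 'z'.toNat = 122 := by decide
        have c5 : '0'.toNat = 48 := by decide
        have c6 : '9'.toNat = 57 := by decide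
        omega
      have hnu : PySem.Chars.isupper c = false := by
        simp only [PySem.Chars.isupper, pvCharLeIff, Bool.and_eq_false_iff,
          decide_eq_false_iff_not, not_le]
        have c1 : 'A'.toNat = 65 := by decide
        have c2 : 'Z'.toNat = 90 := by decide
        omega
      have hcol : pvCollapse (c :: rest) = '_' :: pvCollapse (rest.dropWhile (fun d => !pvReKeep d)) := by
        rw [pvCollapse]; simp [hk']
      have hund : PySem.Chars.lowerChar '_' = '_' := by decide
      constructor
      · rw [pvRunA]
        simp [hnl, hnu, hcol, ih'.2, hund]
      · rw [pvRunA]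
        have hdw : (c :: rest).dropWhile (fun d => !pvReKeep d) = rest.dropWhile (fun d => !pvReKeep d) := by
          simp [hk']
        simp [hnl, hnu, hdw, ih'.2]

-- ===== VERDICT (by name: the statement is the Claim_ definition above) =====
theorem normalize_language_key_part_spec : Claim_equal_normalize_language_key_part := by
  intro text hdom
  unfold Spec_normalize_language_key_part normalize_language_key_part normalize_language_key_part_alt
  have hA : ∀ c ∈ text.toList, pvDomChar c = true := by
    simpa [Dom_normalize_language_key_part, pvDomStr, List.all_eq_true] using hdom
  have h1 := pvFoldA text.toList [] false
  have h2 := (pvMain text.toList hA).1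
  have hstr : String.ofList ((text.toList.foldl (fun (st : List Char × Bool) ch =>
      if (ch.toNat ≤ 127) && (PySem.Chars.islower ch || PySem.Chars.isdigit ch) then
        (st.1 ++ [ch], false)
      else if (ch.toNat ≤ 127) && PySem.Chars.isupper ch then
        (st.1 ++ [PySem.Chars.lowerChar ch], false)
      else if !st.2 then (st.1 ++ ['_'], true)
      else st) ([], false)).1) = PySem.Str.lower (String.ofList (pvCollapse text.toList)) := by
    rw [h1, h2]
    apply String.toList_injective
    simp [PySem.Str.toList_lower, PySem.Chars.lower, String.toList_ofList]
  simp only [hstr]
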